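-- pv_equiv track=rewrite | github.com/Gayathiri02/LEETCODE | Special_keyboard.py | optimalKeys
-- ===== SOURCE A (Python) =====
-- def optimalKeys(N):
--     if N<=6:
--         return N
--     dp=[0]*(N+1)
--     for i in range(7):
--         dp[i]=i
--     for i in range(7,N+1):
--         k=2
--         for j in range(i-3,0,-1):
--             count=dp[j]*k
--             k+=1
--             if(count>dp[i]):
--                 dp[i]=count
--     return dp[N]
-- ===== SOURCE B (Python) =====
-- def optimalKeys(N):
--     # O(N) DP: an optimal last select-copy-paste block multiplies by at most 5,
--     # so dp[n] = max(2*dp[n-3], 3*dp[n-4], 4*dp[n-5], 5*dp[n-6]); keep only a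
--     # sliding window of the last six dp values.
--     if N <= 6:
--         return N
--     a, b, c, d, e, f = 1, 2, 3, 4, 5, 6
--     for _ in range(7, N + 1):
--         cur = max(2 * d, 3 * c, 4 * b, 5 * a)
--         a, b, c, d, e, f = b, c, d, e, f, cur
--     return f
-- ===== Notes on version B (the rewrite author's own statement) =====
-- stated objective: faster
-- what changed: Replaces the O(N^2) DP that rescans all earlier break points for each i with an O(N) DP that keeps only a six-value sliding window, justified by the fact that the best multiplier is always between 2 and 5.
import Mathlib
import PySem

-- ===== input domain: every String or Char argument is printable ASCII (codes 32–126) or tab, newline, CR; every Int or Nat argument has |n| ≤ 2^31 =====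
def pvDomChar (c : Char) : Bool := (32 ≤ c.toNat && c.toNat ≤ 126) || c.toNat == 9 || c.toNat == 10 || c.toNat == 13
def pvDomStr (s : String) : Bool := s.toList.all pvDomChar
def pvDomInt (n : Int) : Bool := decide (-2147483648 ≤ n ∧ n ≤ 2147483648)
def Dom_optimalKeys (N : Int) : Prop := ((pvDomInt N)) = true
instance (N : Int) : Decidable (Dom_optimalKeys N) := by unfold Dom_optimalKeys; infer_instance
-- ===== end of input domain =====

-- B replaces A's O(N^2) rescan of all break points by an O(N) six-value sliding-window DP
-- (the optimal multiplier is always between 2 and 5); both return the same value on every input.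

-- ===== PORT A =====
-- inner loop body: count = dp[j]*k; k += 1; if count > dp[i]: dp[i] = count
def pvA_inner (i : Int) (st : List Int × Int) (j : Int) : List Int × Int :=
  let count := PySem.List.pyGetD st.1 j 0 * st.2
  let k := st.2 + 1
  if count > PySem.List.pyGetD st.1 i 0 then (st.1.set i.toNat count, k) else (st.1, k)

def pvA_outer (dp : List Int) (i : Int) : List Int :=
  ((PySem.List.pyRange (i - 3) 0 (-1)).foldl (pvA_inner i) (dp, 2)).1

def optimalKeys (N : Int) : Int :=
  if N ≤ 6 then N
  else
    let dp : List Int := List.replicate (N + 1).toNat 0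
    let dp := (PySem.List.pyRange 0 7 1).foldl (fun dp i => dp.set i.toNat i) dp
    let dp := (PySem.List.pyRange 7 (N + 1) 1).foldl pvA_outer dp
    PySem.List.pyGetD dp N 0


-- ===== PORT B =====
-- st = (dp[n-6], dp[n-5], dp[n-4], dp[n-3], dp[n-2], dp[n-1]); cur = max(2*d, 3*c, 4*b, 5*a)

def pvB_step (st : Int × Int × Int × Int × Int × Int) (_n : Int) : Int × Int × Int × Int × Int × Int :=
  let (a, b, c, d, e, f) := st
  let cur := max (max (max (2 * d) (3 * c)) (4 * b)) (5 * a)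
  (b, c, d, e, f, cur)

def optimalKeys_alt (N : Int) : Int :=
  if N ≤ 6 then N
  else
    let st := (PySem.List.pyRange 7 (N + 1) 1).foldl pvB_step (1, 2, 3, 4, 5, 6)
    st.2.2.2.2.2


-- ===== PRECONDITION & SPEC =====
def Spec_optimalKeys (N : Int) (out : Int) : Prop := out = optimalKeys_alt N
instance (N : Int) (out : Int) : Decidable (Spec_optimalKeys N out) := by unfold Spec_optimalKeys; infer_instance

-- ===== CLAIM (what is proved, stated in full; the proofs are below) =====
def Claim_equal_optimalKeys : Prop := ∀ (N : Int), Dom_optimalKeys N → Spec_optimalKeys N (optimalKeys N)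

-- ===== LEMMAS AND PROOFS =====

-- the mathematical value of the DP: G n = n for n ≤ 6, else max over break points j of G j * (n-1-j)

def G (n : Nat) : Int :=
  if _h : n ≤ 6 then (n : Int)
  else (List.range (n - 3)).attach.foldl
    (fun acc j => max acc (G (j.1 + 1) * ((n : Int) - 2 - (j.1 : Int)))) 0
termination_by n
decreasing_by
  have := List.mem_range.mp j.2
  omega

def W (n : Nat) : Int :=
  max (max (max (2 * G (n - 3)) (3 * G (n - 4))) (4 * G (n - 5))) (5 * G (n - 6))

theorem G_eq_of_le {n : Nat} (h : n ≤ 6) : G n = (n : Int) := by rw [G]; simp [h]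

theorem G_eq_of_ge {n : Nat} (h : 7 ≤ n) : G n =
    (List.range (n - 3)).foldl (fun acc j => max acc (G (j + 1) * ((n : Int) - 2 - (j : Int)))) 0 := by
  rw [G]; rw [dif_neg (by omega)]
  exact List.foldl_attach (f := fun acc j => max acc (G (j + 1) * ((n : Int) - 2 - (j : Int))))

theorem term_le_G {n t : Nat} (h7 : 7 ≤ n) (ht1 : 1 ≤ t) (ht : t ≤ n - 3) :
    G t * ((n : Int) - 1 - (t : Int)) ≤ G n := by
  rw [G_eq_of_ge h7]
  have H := (PySem.List.le_foldl_max_int (List.range (n - 3))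
    (fun j => G (j + 1) * ((n : Int) - 2 - (j : Int))) 0).2
  have hmem : t - 1 ∈ List.range (n - 3) := List.mem_range.mpr (by omega)
  have h := H (t - 1) hmem
  simp only at h
  have e1 : t - 1 + 1 = t := by omega
  have e2 : ((t - 1 : Nat) : Int) = (t : Int) - 1 := by omega
  rw [e1, e2] at h
  have : (n : Int) - 2 - ((t : Int) - 1) = (n : Int) - 1 - (t : Int) := by ring
  rwa [this] at h

theorem le_G : ∀ n : Nat, (n : Int) ≤ G n := by
  intro n
  induction n using Nat.strong_induction_on with
  | _ n ih =>
    by_cases h : n ≤ 6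
    · rw [G_eq_of_le h]
    · have h7 : 7 ≤ n := by omega
      have h1 := term_le_G (n := n) (t := n - 3) h7 (by omega) (le_refl _)
      have h2 := ih (n - 3) (by omega)
      have e : ((n - 3 : Nat) : Int) = (n : Int) - 3 := by omega
      rw [e] at h1 h2
      have : (n : Int) - 1 - ((n : Int) - 3) = 2 := by ring
      rw [this] at h1
      linarith

theorem G_nonneg (n : Nat) : 0 ≤ G n := le_trans (by exact_mod_cast Int.natCast_nonneg n) (le_G n)

theorem G_two_step {t : Nat} (h : 1 ≤ t) : 2 * G t ≤ G (t + 3) := by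
  by_cases h6 : t + 3 ≤ 6
  · rw [G_eq_of_le (by omega), G_eq_of_le (by omega)]
    push_cast; omega
  · have := term_le_G (n := t + 3) (t := t) (by omega) h (by omega)
    have e : ((t + 3 : Nat) : Int) - 1 - (t : Int) = 2 := by push_cast; ring
    rw [e] at this
    linarith

theorem foldl_maxproj_le {α : Type} (l : List α) (f : α → Int) (init B : Int)
    (h0 : init ≤ B) (h : ∀ x ∈ l, f x ≤ B) :
    l.foldl (fun acc x => max acc (f x)) init ≤ B := by
  induction l generalizing init with
  | nil => exact h0
  | cons a l ih =>
    exact ih _ (max_le h0 (h a (by simp))) (fun x hx => h x (by simp [hx]))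

theorem foldl_maxproj_shift {α : Type} (l : List α) (f : α → Int) (init c : Int) :
    l.foldl (fun acc x => max acc (f x)) (max init c) =
      max (l.foldl (fun acc x => max acc (f x)) init) c := by
  induction l generalizing init with
  | nil => rfl
  | cons a l ih =>
    simp only [List.foldl_cons]
    rw [max_right_comm, ih]

theorem foldl_maxproj_reverse {α : Type} (l : List α) (f : α → Int) (init : Int) :
    l.reverse.foldl (fun acc x => max acc (f x)) init = l.foldl (fun acc x => max acc (f x)) init := by
  induction l generalizing init with
  | nil => rfl
  | cons a l ih =>
    simp only [List.reverse_cons, List.foldl_append, List.foldl_cons, List.foldl_nil]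
    rw [ih, ← foldl_maxproj_shift]

theorem dominate {n : Nat} (h7 : 7 ≤ n) :
    ∀ (d t : Nat), 1 ≤ t → t ≤ n - 3 → n - 3 - t ≤ d → G t * ((n : Int) - 1 - (t : Int)) ≤ W n := by
  intro d
  induction d with
  | zero =>
    intro t ht1 ht hd
    have : t = n - 3 := by omega
    subst this
    have e : (n : Int) - 1 - ((n - 3 : Nat) : Int) = 2 := by omega
    rw [e, mul_comm]
    exact le_max_of_le_left (le_max_of_le_left (le_max_left _ _))
  | succ d ihd =>
    intro t ht1 ht hd
    by_cases hnear : n - 6 ≤ t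
    · have hc : t = n - 3 ∨ t = n - 4 ∨ t = n - 5 ∨ t = n - 6 := by omega
      rcases hc with h | h | h | h <;> subst h
      · have e : (n : Int) - 1 - ((n - 3 : Nat) : Int) = 2 := by omega
        rw [e, mul_comm]
        exact le_max_of_le_left (le_max_of_le_left (le_max_left _ _))
      · have e : (n : Int) - 1 - ((n - 4 : Nat) : Int) = 3 := by omega
        rw [e, mul_comm]
        exact le_max_of_le_left (le_max_of_le_left (le_max_right _ _))
      · have e : (n : Int) - 1 - ((n - 5 : Nat) : Int) = 4 := by omega
        rw [e, mul_comm]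
        exact le_max_of_le_left (le_max_right _ _)
      · have e : (n : Int) - 1 - ((n - 6 : Nat) : Int) = 5 := by omega
        rw [e, mul_comm]
        exact le_max_right _ _
    · have ht7 : t ≤ n - 7 := by omega
      have hm6 : (6 : Int) ≤ (n : Int) - 1 - (t : Int) := by omega
      have hGt := G_nonneg t
      have h2 := G_two_step (t := t) ht1
      have hrest := ihd (t + 3) (by omega) (by omega) (by omega)
      have e : (n : Int) - 1 - ((t + 3 : Nat) : Int) = (n : Int) - 1 - (t : Int) - 3 := by
        push_cast; ring
      rw [e] at hrest
      calc G t * ((n : Int) - 1 - (t : Int))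
          ≤ (2 * G t) * ((n : Int) - 1 - (t : Int) - 3) := by nlinarith
        _ ≤ G (t + 3) * ((n : Int) - 1 - (t : Int) - 3) :=
            mul_le_mul_of_nonneg_right h2 (by omega)
        _ ≤ W n := hrest

theorem W_nonneg {n : Nat} : (0 : Int) ≤ W n := by
  have := G_nonneg (n - 3)
  calc (0:Int) ≤ 2 * G (n - 3) := by linarith
    _ ≤ W n := le_max_of_le_left (le_max_of_le_left (le_max_left _ _))

theorem G_eq_W {n : Nat} (h : 7 ≤ n) : G n = W n := by
  apply le_antisymm
  · rw [G_eq_of_ge h]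
    apply foldl_maxproj_le _ _ _ _ W_nonneg
    intro j hj
    have hj' := List.mem_range.mp hj
    have hdom := dominate h n (j + 1) (by omega) (by omega) (by omega)
    have e : (n : Int) - 1 - ((j + 1 : Nat) : Int) = (n : Int) - 2 - (j : Int) := by
      push_cast; ring
    rwa [e] at hdom
  · have t3 := term_le_G (n := n) (t := n - 3) h (by omega) (by omega)
    have t4 := term_le_G (n := n) (t := n - 4) h (by omega) (by omega)
    have t5 := term_le_G (n := n) (t := n - 5) h (by omega) (by omega)
    have t6 := term_le_G (n := n) (t := n - 6) h (by omega) (by omega)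
    rw [show (n : Int) - 1 - ((n - 3 : Nat) : Int) = 2 by omega, mul_comm] at t3
    rw [show (n : Int) - 1 - ((n - 4 : Nat) : Int) = 3 by omega, mul_comm] at t4
    rw [show (n : Int) - 1 - ((n - 5 : Nat) : Int) = 4 by omega, mul_comm] at t5
    rw [show (n : Int) - 1 - ((n - 6 : Nat) : Int) = 5 by omega, mul_comm] at t6
    exact max_le (max_le (max_le t3 t4) t5) t6

theorem B_loop : ∀ (m : Nat), 6 ≤ m →
    (PySem.List.pyRange 7 ((m : Int) + 1) 1).foldl pvB_step (1, 2, 3, 4, 5, 6) =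
      (G (m - 5), G (m - 4), G (m - 3), G (m - 2), G (m - 1), G m) := by
  intro m hm
  induction m, hm using Nat.le_induction with
  | base =>
    rw [show ((6 : Nat) : Int) + 1 = 7 by norm_num, PySem.List.pyRange_one_eq_nil le_rfl]
    simp only [List.foldl_nil]
    rw [G_eq_of_le (by norm_num : 6 - 5 ≤ 6), G_eq_of_le (by norm_num : 6 - 4 ≤ 6),
        G_eq_of_le (by norm_num : 6 - 3 ≤ 6), G_eq_of_le (by norm_num : 6 - 2 ≤ 6),
        G_eq_of_le (by norm_num : 6 - 1 ≤ 6), G_eq_of_le (le_rfl)]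
    norm_num
  | succ m hm ih =>
    rw [show ((m + 1 : Nat) : Int) + 1 = ((m : Int) + 1) + 1 by push_cast; ring]
    rw [PySem.List.pyRange_one_succ_right (by omega : (7 : Int) ≤ (m : Int) + 1)]
    rw [List.foldl_append, ih]
    simp only [List.foldl_cons, List.foldl_nil, pvB_step]
    rw [show m + 1 - 5 = m - 4 by omega, show m + 1 - 4 = m - 3 by omega,
        show m + 1 - 3 = m - 2 by omega, show m + 1 - 2 = m - 1 by omega,
        show m + 1 - 1 = m by omega]
    refine congrArg _ (congrArg _ (congrArg _ (congrArg _ (congrArg _ ?_))))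
    rw [show G (m + 1) = W (m + 1) from G_eq_W (by omega)]
    unfold W
    rw [show m + 1 - 3 = m - 2 by omega, show m + 1 - 4 = m - 3 by omega,
        show m + 1 - 5 = m - 4 by omega, show m + 1 - 6 = m - 5 by omega]

theorem alt_eq {N : Int} (h : 7 ≤ N) : optimalKeys_alt N = G N.toNat := by
  unfold optimalKeys_alt
  rw [if_neg (by omega)]
  rw [show N + 1 = ((N.toNat : Int)) + 1 by omega]
  rw [B_loop N.toNat (by omega)]

theorem inner_spec (i : Int) (h7 : 7 ≤ i) (dp0 : List Int) (hi : i.toNat < dp0.length) :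
    ∀ (m : Nat) (dp : List Int),
      dp.length = dp0.length →
      (∀ t : Nat, t ≠ i.toNat → dp[t]? = dp0[t]?) →
      (m : Int) ≤ i - 3 →
      (((PySem.List.pyRange (m : Int) 0 (-1)).foldl (pvA_inner i) (dp, i - 1 - (m : Int))).1.length = dp0.length) ∧
      (∀ t : Nat, t ≠ i.toNat →
        ((PySem.List.pyRange (m : Int) 0 (-1)).foldl (pvA_inner i) (dp, i - 1 - (m : Int))).1[t]? = dp0[t]?) ∧
      PySem.List.pyGetD ((PySem.List.pyRange (m : Int) 0 (-1)).foldl (pvA_inner i) (dp, i - 1 - (m : Int))).1 i 0 =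
        (PySem.List.pyRange (m : Int) 0 (-1)).foldl
          (fun acc j => max acc (PySem.List.pyGetD dp0 j 0 * (i - 1 - j))) (PySem.List.pyGetD dp i 0) := by
  intro m
  induction m with
  | zero =>
    intro dp hlen hagree _
    rw [show ((0 : Nat) : Int) = 0 by norm_num, PySem.List.pyRange_neg_one_eq_nil le_rfl]
    exact ⟨hlen, hagree, rfl⟩
  | succ m ih =>
    intro dp hlen hagree hm
    have hne : m + 1 ≠ i.toNat := by omega
    rw [PySem.List.pyRange_neg_one_cons (by positivity : (0 : Int) < ((m + 1 : Nat) : Int))]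
    rw [show ((m + 1 : Nat) : Int) - 1 = ((m : Nat) : Int) by push_cast; ring]
    simp only [List.foldl_cons]
    -- the value Python reads: dp[m+1] = dp0[m+1]
    have hread : PySem.List.pyGetD dp ((m + 1 : Nat) : Int) 0 = PySem.List.pyGetD dp0 ((m + 1 : Nat) : Int) 0 := by
      rw [PySem.List.pyGetD_natCast, PySem.List.pyGetD_natCast,
          List.getD_eq_getElem?_getD, List.getD_eq_getElem?_getD, hagree _ hne]
    have hcur : PySem.List.pyGetD dp i 0 = dp.getD i.toNat 0 :=
      PySem.List.pyGetD_of_nonneg dp 0 (by omega)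
    have hkstep : i - 1 - ((m + 1 : Nat) : Int) + 1 = i - 1 - ((m : Nat) : Int) := by push_cast; ring
    set count := PySem.List.pyGetD dp0 ((m + 1 : Nat) : Int) 0 * (i - 1 - ((m + 1 : Nat) : Int)) with hcount
    have hstep : pvA_inner i (dp, i - 1 - ((m + 1 : Nat) : Int)) ((m + 1 : Nat) : Int) =
        (if count > PySem.List.pyGetD dp i 0 then dp.set i.toNat count else dp, i - 1 - ((m : Nat) : Int)) := by
      simp only [pvA_inner, hread, ← hcount]
      split_ifs <;> rw [hkstep]
    rw [hstep]
    by_cases hgt : count > PySem.List.pyGetD dp i 0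
    · rw [if_pos hgt]
      have hlen' : (dp.set i.toNat count).length = dp0.length := by simp [hlen]
      have hagree' : ∀ t : Nat, t ≠ i.toNat → (dp.set i.toNat count)[t]? = dp0[t]? := by
        intro t ht
        rw [List.getElem?_set, if_neg (fun hh => ht hh.symm), hagree t ht]
      obtain ⟨r1, r2, r3⟩ := ih (dp.set i.toNat count) hlen' hagree' (by push_cast at hm ⊢; omega)
      refine ⟨r1, r2, ?_⟩
      rw [r3]
      have : PySem.List.pyGetD (dp.set i.toNat count) i 0 = count := by
        rw [PySem.List.pyGetD_of_nonneg _ _ (by omega), List.getD_eq_getElem?_getD,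
            List.getElem?_set, if_pos rfl, if_pos (by omega : i.toNat < dp.length)]
        rfl
      rw [this]
      congr 1
      rw [hcur]
      have : dp.getD i.toNat 0 ≤ count := by rw [← hcur]; omega
      omega
    · rw [if_neg hgt]
      obtain ⟨r1, r2, r3⟩ := ih dp hlen hagree (by push_cast at hm ⊢; omega)
      refine ⟨r1, r2, ?_⟩
      rw [r3]
      congr 1
      have : count ≤ PySem.List.pyGetD dp i 0 := by omega
      omega

theorem init_facts (L : Nat) :
    (((PySem.List.pyRange 0 7 1).foldl (fun dp i => dp.set i.toNat i) (List.replicate L (0 : Int))).length = L) ∧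
    ∀ t : Nat, t < L →
      ((PySem.List.pyRange 0 7 1).foldl (fun dp i => dp.set i.toNat i) (List.replicate L (0 : Int)))[t]? =
        some (if t < 7 then (t : Int) else 0) := by
  rw [show PySem.List.pyRange 0 7 1 = [0, 1, 2, 3, 4, 5, 6] from by decide]
  simp only [List.foldl_cons, List.foldl_nil]
  refine ⟨by simp, ?_⟩
  intro t ht
  simp only [show (0 : Int).toNat = 0 from rfl, show (1 : Int).toNat = 1 from rfl,
    show (2 : Int).toNat = 2 from rfl, show (3 : Int).toNat = 3 from rfl,
    show (4 : Int).toNat = 4 from rfl, show (5 : Int).toNat = 5 from rfl,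
    show (6 : Int).toNat = 6 from rfl,
    List.getElem?_set, List.length_set, List.length_replicate, List.getElem?_replicate]
  split_ifs <;> simp_all <;> omega

theorem outer_spec {N : Int} (h : 7 ≤ N) (dpI : List Int)
    (h1 : dpI.length = (N + 1).toNat)
    (h2 : ∀ t : Nat, t < (N + 1).toNat → dpI[t]? = some (if t < 7 then G t else 0)) :
    ∀ (m : Nat), 6 ≤ m → (m : Int) ≤ N →
      (((PySem.List.pyRange 7 ((m : Int) + 1) 1).foldl pvA_outer dpI).length = (N + 1).toNat) ∧
      ∀ t : Nat, t < (N + 1).toNat →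
        ((PySem.List.pyRange 7 ((m : Int) + 1) 1).foldl pvA_outer dpI)[t]? =
          some (if t < m + 1 then G t else 0) := by
  intro m hm
  induction m, hm using Nat.le_induction with
  | base =>
    intro _
    rw [show ((6 : Nat) : Int) + 1 = 7 by norm_num, PySem.List.pyRange_one_eq_nil le_rfl]
    simp only [List.foldl_nil]
    refine ⟨h1, fun t ht => ?_⟩
    rw [h2 t ht]
  | succ m hm ih =>
    intro hmN
    have hmN' : (m : Int) ≤ N := by omega
    obtain ⟨ihl, ihe⟩ := ih hmN'
    rw [show ((m + 1 : Nat) : Int) + 1 = ((m : Int) + 1) + 1 by push_cast; ring]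
    rw [PySem.List.pyRange_one_succ_right (by omega : (7 : Int) ≤ (m : Int) + 1), List.foldl_append]
    simp only [List.foldl_cons, List.foldl_nil]
    set dp := (PySem.List.pyRange 7 ((m : Int) + 1) 1).foldl pvA_outer dpI with hdp
    unfold pvA_outer
    have hiNat : ((m : Int) + 1).toNat = m + 1 := by omega
    have hiLt : ((m : Int) + 1).toNat < dp.length := by rw [ihl]; omega
    rw [show (m : Int) + 1 - 3 = ((m - 2 : Nat) : Int) by omega,
        show (2 : Int) = (m : Int) + 1 - 1 - ((m - 2 : Nat) : Int) by omega]
    obtain ⟨r1, r2, r3⟩ := inner_spec ((m : Int) + 1) (by omega) dp hiLt (m - 2) dp rfl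
      (fun _ _ => rfl) (by omega)
    refine ⟨by rw [r1, ihl], ?_⟩
    intro t ht
    by_cases hti : t = m + 1
    · subst hti
      -- dp[i] starts at 0
      have hinit : PySem.List.pyGetD dp ((m : Int) + 1) 0 = 0 := by
        rw [PySem.List.pyGetD_of_nonneg _ _ (by omega), hiNat,
            List.getD_eq_getElem?_getD, ihe (m + 1) ht]
        simp
      -- the inner fold computes G (m+1)
      have hfold : (PySem.List.pyRange ((m - 2 : Nat) : Int) 0 (-1)).foldl
          (fun acc j => max acc (PySem.List.pyGetD dp j 0 * ((m : Int) + 1 - 1 - j)))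
          (PySem.List.pyGetD dp ((m : Int) + 1) 0) = G (m + 1) := by
        rw [hinit, PySem.List.pyRange_neg_one_eq_reverse,
            foldl_maxproj_reverse _ (fun j => PySem.List.pyGetD dp j 0 * ((m : Int) + 1 - 1 - j)),
            show (0 : Int) + 1 = 1 by norm_num,
            PySem.List.pyRange_one 1 (((m - 2 : Nat) : Int) + 1),
            show (((m - 2 : Nat) : Int) + 1 - 1).toNat = m - 2 by omega,
            List.foldl_map]
        rw [G_eq_of_ge (by omega : 7 ≤ m + 1), show m + 1 - 3 = m - 2 by omega]
        apply PySem.List.foldl_congr_mem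
        intro acc k hk
        have hk' := List.mem_range.mp hk
        congr 1
        have e1 : (1 : Int) + (k : Int) = ((k + 1 : Nat) : Int) := by push_cast; ring
        rw [e1, PySem.List.pyGetD_natCast, List.getD_eq_getElem?_getD,
            ihe (k + 1) (by omega), if_pos (by omega)]
        have e2 : ((m : Int) + 1 - 1 - ((k + 1 : Nat) : Int)) = ((m + 1 : Nat) : Int) - 2 - (k : Int) := by
          push_cast; ring
        rw [e2]
        rfl
      set res := (List.foldl (pvA_inner ((m : Int) + 1)) (dp, (m : Int) + 1 - 1 - ((m - 2 : Nat) : Int))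
        (PySem.List.pyRange ((m - 2 : Nat) : Int) 0 (-1))).1 with hres
      have hval : PySem.List.pyGetD res ((m : Int) + 1) 0 = G (m + 1) := r3.trans hfold
      have hlt2 : m + 1 < res.length := by rw [r1, ihl]; omega
      rw [List.getElem?_eq_getElem hlt2, if_pos (by omega)]
      have : res[m + 1] = G (m + 1) := by
        rw [← hval, PySem.List.pyGetD_of_nonneg _ _ (by omega), hiNat,
            List.getD_eq_getElem _ _ hlt2]
      rw [this]
    · rw [r2 t (by omega)]
      rw [ihe t ht]
      have : (if t < m + 1 then G t else 0) = (if t < m + 1 + 1 then G t else 0) := by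
        split_ifs <;> first | rfl | omega
      rw [this]

theorem A_eq {N : Int} (h : 7 ≤ N) : optimalKeys N = G N.toNat := by
  unfold optimalKeys
  rw [if_neg (by omega)]
  show PySem.List.pyGetD
    ((PySem.List.pyRange 7 (N + 1) 1).foldl pvA_outer
      ((PySem.List.pyRange 0 7 1).foldl (fun dp i => dp.set i.toNat i)
        (List.replicate (N + 1).toNat 0))) N 0 = G N.toNat
  obtain ⟨i1, i2⟩ := init_facts (N + 1).toNat
  have h2 : ∀ t : Nat, t < (N + 1).toNat →
      ((PySem.List.pyRange 0 7 1).foldl (fun dp i => dp.set i.toNat i)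
        (List.replicate (N + 1).toNat (0 : Int)))[t]? = some (if t < 7 then G t else 0) := by
    intro t ht
    rw [i2 t ht]
    congr 1
    split_ifs with h'
    · rw [G_eq_of_le (by omega)]
    · rfl
  obtain ⟨m1, m2⟩ := outer_spec h _ i1 h2 N.toNat (by omega) (by omega)
  rw [show N + 1 = ((N.toNat : Nat) : Int) + 1 by omega] at *
  have hNlt : N.toNat < (((N.toNat : Nat) : Int) + 1).toNat := by omega
  have := m2 N.toNat hNlt
  rw [PySem.List.pyGetD_of_nonneg _ _ (by omega : (0:Int) ≤ N),
      List.getD_eq_getElem?_getD]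
  rw [this, if_pos (Nat.lt_succ_self _)]
  rfl


-- ===== VERDICT (by name: the statement is the Claim_ definition above) =====
theorem optimalKeys_spec : Claim_equal_optimalKeys := by
  intro N _
  unfold Spec_optimalKeys
  by_cases h : N ≤ 6
  · simp [optimalKeys, optimalKeys_alt, h]
  · rw [A_eq (by omega), alt_eq (by omega)]
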